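-- pv_equiv track=rewrite | github.com/MarcinGladkowski/advent_of_code_2024 | day_7/main.py | execute_combination
-- ===== SOURCE A (Python) =====
-- def execute_combination(combination: str, numbers: list[int]) -> int:
--     result = 0
--     for index, number in enumerate(numbers):
--         if index == 0:
--             result += number
--             continue
--         if combination[index - 1] == '*':
--             result *= number
--         if combination[index - 1] == '+':
--             result += number
--
--     return result
-- ===== SOURCE B (Python) =====
-- def execute_combination(combination: str, numbers: list[int]) -> int:
--     # Back-to-front sum-of-products: by distributivity, the left-to-right
--     # evaluation equals each added term times the product of the '*'-operands
--     # to its right. One reverse pass keeps that suffix product in `mult`.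
--     if not numbers:
--         return 0
--     mult = 1
--     total = 0
--     for i in range(len(numbers) - 1, 0, -1):
--         op = combination[i - 1]
--         if op == '*':
--             mult = mult * numbers[i]
--         elif op == '+':
--             total = total + numbers[i] * mult
--     return total + numbers[0] * mult
-- ===== Notes on version B (the rewrite author's own statement) =====
-- stated objective: alternative
-- what changed: Replaced the left-to-right accumulator evaluation by a back-to-front sum-of-products pass: one reverse loop maintains the running suffix product of the '*'-operands and adds each '+'-operand (and finally numbers[0]) pre-multiplied by that product, which equals the sequential evaluation by distributivity.
import Mathlib
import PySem

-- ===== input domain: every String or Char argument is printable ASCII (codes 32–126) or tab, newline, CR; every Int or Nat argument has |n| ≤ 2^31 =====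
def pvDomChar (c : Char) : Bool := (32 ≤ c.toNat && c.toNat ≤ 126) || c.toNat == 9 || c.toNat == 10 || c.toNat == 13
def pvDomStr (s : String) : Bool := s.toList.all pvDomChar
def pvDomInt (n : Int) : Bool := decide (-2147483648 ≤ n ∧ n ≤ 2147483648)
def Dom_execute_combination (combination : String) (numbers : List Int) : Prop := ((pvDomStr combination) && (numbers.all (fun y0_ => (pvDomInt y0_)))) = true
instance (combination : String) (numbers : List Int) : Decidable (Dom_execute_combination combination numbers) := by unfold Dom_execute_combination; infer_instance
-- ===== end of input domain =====

-- B replaces A's left-to-right accumulator evaluation by a back-to-front sum-of-products pass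
-- (suffix product of the '*'-operands); same cost, a genuinely different traversal, equal by
-- distributivity. Equivalence proved on Pre_ (combination long enough, else Python raises).

-- ===== PORT A =====
def execute_combination (combination : String) (numbers : List Int) : Int :=
  (PySem.List.enumerate numbers).foldl
    (fun result p =>
      if p.1 = 0 then result + p.2
      else
        let r1 := if PySem.Str.pyGet? combination (p.1 - 1) = some '*' then result * p.2 else result
        if PySem.Str.pyGet? combination (p.1 - 1) = some '+' then r1 + p.2 else r1)
    0

-- ===== PORT B =====
def execute_combination_alt (combination : String) (numbers : List Int) : Int :=
  match numbers with
  | [] => 0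
  | n :: _ =>
    let p := (PySem.List.pyRange ((numbers.length : Int) - 1) 0 (-1)).foldl
      (fun (st : Int × Int) i =>
        let op := PySem.Str.pyGet? combination (i - 1)
        if op = some '*' then (st.1 * PySem.List.pyGetD numbers i 0, st.2)
        else if op = some '+' then (st.1, st.2 + PySem.List.pyGetD numbers i 0 * st.1)
        else st)
      (1, 0)
    p.2 + n * p.1

-- ===== PRECONDITION & SPEC =====
-- Pre_ excludes exactly the inputs where Python A raises IndexError: combination shorter than
-- len(numbers) - 1 (B indexes the same positions and raises identically there).
def Pre_execute_combination (combination : String) (numbers : List Int) : Prop :=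
  numbers.length ≤ combination.toList.length + 1
instance (combination : String) (numbers : List Int) : Decidable (Pre_execute_combination combination numbers) := by unfold Pre_execute_combination; infer_instance
def pvWitness_execute_combination : String × List Int := ("+*", [1, 2, 3])

def Spec_execute_combination (combination : String) (numbers : List Int) (out : Int) : Prop := out = execute_combination_alt combination numbers
instance (combination : String) (numbers : List Int) (out : Int) : Decidable (Spec_execute_combination combination numbers out) := by unfold Spec_execute_combination; infer_instance

-- ===== CLAIM (what is proved, stated in full; the proofs are below) =====
def Claim_equal_execute_combination : Prop := ∀ (combination : String) (numbers : List Int), Dom_execute_combination combination numbers → Pre_execute_combination combination numbers → Spec_execute_combination combination numbers (execute_combination combination numbers)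

-- ===== LEMMAS AND PROOFS =====

-- Distributivity core: the left fold of the if-chain step over any index list equals
-- acc * M + T, where (M, T) is B's pair computed by a right fold over the same list.
theorem foldl_eq_mul_add (c : String) (ns : List Int) (L : List Int) (acc : Int) :
    L.foldl
      (fun acc j =>
        if PySem.Str.pyGet? c (j - 1) = some '*' then acc * PySem.List.pyGetD ns j 0
        else if PySem.Str.pyGet? c (j - 1) = some '+' then acc + PySem.List.pyGetD ns j 0
        else acc) acc
    = acc * (L.foldr
        (fun j (st : Int × Int) =>
          let op := PySem.Str.pyGet? c (j - 1)
          if op = some '*' then (st.1 * PySem.List.pyGetD ns j 0, st.2)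
          else if op = some '+' then (st.1, st.2 + PySem.List.pyGetD ns j 0 * st.1)
          else st) (1, 0)).1
      + (L.foldr
        (fun j (st : Int × Int) =>
          let op := PySem.Str.pyGet? c (j - 1)
          if op = some '*' then (st.1 * PySem.List.pyGetD ns j 0, st.2)
          else if op = some '+' then (st.1, st.2 + PySem.List.pyGetD ns j 0 * st.1)
          else st) (1, 0)).2 := by
  induction L generalizing acc with
  | nil => simp
  | cons j rest ih =>
    simp only [List.foldl_cons, List.foldr_cons]
    rw [ih]
    split_ifs with h1 h2
    · simp; ring
    · simp; ring
    · simp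

-- ===== VERDICT (by name: the statement is the Claim_ definition above) =====
theorem execute_combination_spec : Claim_equal_execute_combination := by
  intro c ns _ _
  show execute_combination c ns = execute_combination_alt c ns
  unfold execute_combination execute_combination_alt
  cases ns with
  | nil => simp [PySem.List.enumerate]
  | cons n tl =>
    rw [PySem.List.enumerate_eq_map_pyRange (d := 0), List.foldl_map]
    have hlen : (0 : Int) < ((n :: tl).length : Int) := by exact_mod_cast Nat.succ_pos tl.length
    simp only [PySem.List.len_eq]
    rw [PySem.List.pyRange_one_cons hlen]
    simp only [List.foldl_cons, PySem.List.pyGetD_zero_cons, zero_add, reduceIte]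
    have hchain : (PySem.List.pyRange 1 ((n :: tl).length : Int) 1).foldl
        (fun x (y : Int) =>
          if y = 0 then x + PySem.List.pyGetD (n :: tl) y 0
          else
            if PySem.Str.pyGet? c (y - 1) = some '+' then
              (if PySem.Str.pyGet? c (y - 1) = some '*' then x * PySem.List.pyGetD (n :: tl) y 0 else x) +
                PySem.List.pyGetD (n :: tl) y 0
            else if PySem.Str.pyGet? c (y - 1) = some '*' then x * PySem.List.pyGetD (n :: tl) y 0 else x) n
      = (PySem.List.pyRange 1 ((n :: tl).length : Int) 1).foldl
        (fun acc (j : Int) =>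
          if PySem.Str.pyGet? c (j - 1) = some '*' then acc * PySem.List.pyGetD (n :: tl) j 0
          else if PySem.Str.pyGet? c (j - 1) = some '+' then acc + PySem.List.pyGetD (n :: tl) j 0
          else acc) n := by
      apply PySem.List.foldl_congr_mem
      intro acc j hjmem
      have hj : (1 : Int) ≤ j := (PySem.List.mem_pyRange_one.1 hjmem).1
      have hj0 : j ≠ 0 := by omega
      rw [if_neg hj0]
      rcases h : PySem.Str.pyGet? c (j - 1) with _ | ch
      · simp
      · by_cases h1 : ch = '*'
        · subst h1; simp
        · by_cases h2 : ch = '+' <;> simp [h1, h2]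
    rw [hchain, foldl_eq_mul_add]
    rw [PySem.List.pyRange_neg_one_eq_reverse]
    have hadd : ((n :: tl).length : Int) - 1 + 1 = ((n :: tl).length : Int) := by ring
    rw [hadd, List.foldl_reverse]
    ring_nf
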